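-- pv_equiv track=rewrite | github.com/marcusglee11/LifeOS | runtime/tools/workflow_pack.py | _waiver_applies_to_files
-- ===== SOURCE A (Python) =====
-- from typing import Iterable, Optional, Sequence
--
-- def _waiver_applies_to_files(paths: Sequence[str], files: Sequence[str]) -> bool:
--     if not paths:
--         return True
--     for file_path in files:
--         for candidate in paths:
--             if file_path == candidate or file_path.startswith(candidate.rstrip("/") + "/"):
--                 return True
--     return False
-- ===== SOURCE B (Python) =====
-- def _waiver_applies_to_files(paths, files):
--     if not paths:
--         return True
--     raw = set(paths)
--     stripped = {c.rstrip("/") for c in paths}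
--     for f in files:
--         if f in raw:
--             return True
--         for i, ch in enumerate(f):
--             if ch == "/" and f[:i] in stripped:
--                 return True
--     return False
-- ===== Notes on version B (the rewrite author's own statement) =====
-- stated objective: alternative
-- what changed: Replaces the per-file scan over all candidate paths with two precomputed sets (raw candidates and rstrip('/')-stripped candidates) and, per file, set lookups of the file itself and of each of its '/'-delimited ancestor prefixes.
import Mathlib
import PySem

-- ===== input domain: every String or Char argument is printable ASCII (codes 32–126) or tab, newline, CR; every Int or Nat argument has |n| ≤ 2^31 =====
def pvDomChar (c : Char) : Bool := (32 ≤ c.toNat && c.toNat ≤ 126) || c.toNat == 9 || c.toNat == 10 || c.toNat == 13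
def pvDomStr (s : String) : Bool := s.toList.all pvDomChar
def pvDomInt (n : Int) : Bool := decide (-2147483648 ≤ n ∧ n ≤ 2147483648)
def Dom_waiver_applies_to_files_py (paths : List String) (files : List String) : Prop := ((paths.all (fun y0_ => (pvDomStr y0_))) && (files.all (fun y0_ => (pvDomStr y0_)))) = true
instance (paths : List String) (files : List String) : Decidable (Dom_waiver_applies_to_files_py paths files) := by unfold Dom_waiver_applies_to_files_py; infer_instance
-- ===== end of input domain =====

-- B replaces A's per-file scan over all candidates by set lookups against two precomputed
-- sets (raw paths and '/'-right-stripped paths), checking each file and its '/'-delimited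
-- ancestor prefixes; return value equivalence is proved, no side effects are involved.

-- ===== PORT A =====
-- s.rstrip("/") on a list of chars: drop trailing '/' characters (exact: the chars set is the single char '/')
def pyRstripSlash (s : List Char) : List Char := (s.reverse.dropWhile (· == '/')).reverse

def waiver_applies_to_files_py (paths : List String) (files : List String) : Bool :=
  if paths.isEmpty then true
  else
    files.any (fun file_path =>
      paths.any (fun candidate =>
        file_path == candidate ||
          PySem.Chars.startswith file_path.toList (pyRstripSlash candidate.toList ++ ['/'])))

-- ===== PORT B =====
def waiver_applies_to_files_py_alt (paths : List String) (files : List String) : Bool :=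
  if paths.isEmpty then true
  else
    let raw : PySem.Set String := PySem.Set.ofList paths
    let stripped : PySem.Set (List Char) :=
      PySem.Set.ofList (paths.map (fun c => pyRstripSlash c.toList))
    files.any (fun f =>
      PySem.Set.contains raw f ||
        (PySem.List.enumerate f.toList 0).any (fun p =>
          p.2 == '/' && PySem.Set.contains stripped (PySem.List.slice f.toList none (some p.1))))

-- ===== PRECONDITION & SPEC =====
def Spec_waiver_applies_to_files_py (paths : List String) (files : List String) (out : Bool) : Prop := out = waiver_applies_to_files_py_alt paths files
instance (paths : List String) (files : List String) (out : Bool) : Decidable (Spec_waiver_applies_to_files_py paths files out) := by unfold Spec_waiver_applies_to_files_py; infer_instance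

-- ===== CLAIM (what is proved, stated in full; the proofs are below) =====
def Claim_equal_waiver_applies_to_files_py : Prop := ∀ (paths : List String) (files : List String), Dom_waiver_applies_to_files_py paths files → Spec_waiver_applies_to_files_py paths files (waiver_applies_to_files_py paths files)

-- ===== LEMMAS AND PROOFS =====

-- p ++ ['/'] is a prefix of s  ↔  some '/' in s at index k cuts s into p and the rest
theorem prefix_slash_iff (p s : List Char) :
    (p ++ ['/']) <+: s ↔ ∃ (k : Nat) (h : k < s.length), s[k] = '/' ∧ s.take k = p := by
  constructor
  · rintro ⟨t, ht⟩
    refine ⟨p.length, ?_, ?_, ?_⟩ <;> subst ht <;>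
      simp [List.getElem_append, List.take_append]
  · rintro ⟨k, hk, hc, hp⟩
    refine ⟨s.drop (k + 1), ?_⟩
    have h2 : s.take (k + 1) = p ++ ['/'] := by
      rw [List.take_succ_eq_append_getElem hk, hp, hc]
    calc p ++ ['/'] ++ s.drop (k + 1) = s.take (k + 1) ++ s.drop (k + 1) := by rw [h2]
      _ = s := List.take_append_drop (k + 1) s

theorem per_file_eq (paths : List String) (f : String) :
    (paths.any (fun candidate =>
        f == candidate ||
          PySem.Chars.startswith f.toList (pyRstripSlash candidate.toList ++ ['/'])))
    = (PySem.Set.contains (PySem.Set.ofList paths) f ||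
        (PySem.List.enumerate f.toList 0).any (fun p =>
          p.2 == '/' && PySem.Set.contains
            (PySem.Set.ofList (paths.map (fun c => pyRstripSlash c.toList)))
            (PySem.List.slice f.toList none (some p.1)))) := by
  rw [Bool.eq_iff_iff]
  simp only [List.any_eq_true, Bool.or_eq_true, Bool.and_eq_true, beq_iff_eq,
    PySem.Set.contains_iff, PySem.Set.mem_ofList, PySem.Chars.startswith_iff,
    PySem.List.mem_enumerate_iff, List.mem_map, prefix_slash_iff]
  constructor
  · rintro ⟨c, hc, h | ⟨k, hk, hsl, htk⟩⟩
    · exact Or.inl (h ▸ hc)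
    · refine Or.inr ⟨(0 + (k : Int), f.toList[k]), ⟨k, hk, rfl⟩, by simpa using hsl, ?_⟩
      have : PySem.List.slice f.toList none (some (0 + (k : Int))) = f.toList.take k := by
        simpa using PySem.List.slice_to_natCast f.toList k
      exact this ▸ (htk ▸ ⟨c, hc, rfl⟩)
  · rintro (h | ⟨p, ⟨k, hk, rfl⟩, hsl, c, hc, hstr⟩)
    · exact ⟨f, h, Or.inl rfl⟩
    · refine ⟨c, hc, Or.inr ⟨k, hk, by simpa using hsl, ?_⟩⟩
      have : PySem.List.slice f.toList none (some (0 + (k : Int))) = f.toList.take k := by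
        simpa using PySem.List.slice_to_natCast f.toList k
      rw [this] at hstr
      exact hstr ▸ rfl

-- ===== VERDICT (by name: the statement is the Claim_ definition above) =====
theorem waiver_applies_to_files_py_spec : Claim_equal_waiver_applies_to_files_py := by
  intro paths files _
  unfold Spec_waiver_applies_to_files_py waiver_applies_to_files_py waiver_applies_to_files_py_alt
  split
  · rfl
  · show _ = (files.any _ : Bool)
    exact List.any_congr rfl (fun f => per_file_eq paths f)
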